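-- pv_equiv track=rewrite | github.com/ArthurGamaJorge/PreviDengue | api/main.py | caculateIntensity
-- ===== SOURCE A (Python) =====
-- def caculateIntensity(objetos):
--     count_piscina = sum(1 for o in objetos if o["class"] == "piscina")
--     count_caixa = sum(1 for o in objetos if o["class"] == "caixa_agua")
--     count_carro = sum(1 for o in objetos if o["class"] == "carro")
--
--     w_piscina = 9
--     w_caixa = 4
--     w_carro = 1
--
--     score = count_piscina * w_piscina + count_caixa * w_caixa + count_carro * w_carro
--     return score
-- ===== SOURCE B (Python) =====
-- WEIGHTS = {"piscina": 9, "caixa_agua": 4, "carro": 1}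
--
-- def caculateIntensity(objetos):
--     score = 0
--     for o in objetos:
--         score += WEIGHTS.get(o["class"], 0)
--     return score
-- ===== Notes on version B (the rewrite author's own statement) =====
-- stated objective: idiomatic
-- what changed: Replaces three separate counting passes over objetos (one per class) with a single pass that accumulates weights from a lookup table.
import Mathlib
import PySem

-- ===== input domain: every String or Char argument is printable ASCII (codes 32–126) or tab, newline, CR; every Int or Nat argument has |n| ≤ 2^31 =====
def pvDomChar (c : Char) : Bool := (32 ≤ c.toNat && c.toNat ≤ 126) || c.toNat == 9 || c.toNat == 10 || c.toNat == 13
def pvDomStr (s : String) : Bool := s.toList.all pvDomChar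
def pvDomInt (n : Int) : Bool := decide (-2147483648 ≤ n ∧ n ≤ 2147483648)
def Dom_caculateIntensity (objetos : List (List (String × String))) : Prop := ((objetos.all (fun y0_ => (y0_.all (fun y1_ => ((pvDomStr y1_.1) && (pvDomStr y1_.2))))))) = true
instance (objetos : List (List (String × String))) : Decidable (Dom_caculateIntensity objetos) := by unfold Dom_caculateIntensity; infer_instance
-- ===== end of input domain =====

-- B replaces A's three separate counting passes over objetos with one pass adding weights from a lookup table.


-- ===== PORT A =====
-- o["class"] on an association-list dict: first matching key (total form under Pre_, which guarantees the key is present)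
def pvClassOf (o : List (String × String)) : Option String :=
  (o.find? (fun kv => kv.1 == "class")).map (·.2)

def caculateIntensity (objetos : List (List (String × String))) : Int :=
  let count_piscina := ((objetos.filter (fun o => pvClassOf o == some "piscina")).map (fun _ => (1 : Int))).sum
  let count_caixa := ((objetos.filter (fun o => pvClassOf o == some "caixa_agua")).map (fun _ => (1 : Int))).sum
  let count_carro := ((objetos.filter (fun o => pvClassOf o == some "carro")).map (fun _ => (1 : Int))).sum
  count_piscina * 9 + count_caixa * 4 + count_carro * 1

-- ===== PORT B =====
def pvWeights : PySem.Dict String Int :=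
  PySem.Dict.ofList [("piscina", 9), ("caixa_agua", 4), ("carro", 1)]

def caculateIntensity_alt (objetos : List (List (String × String))) : Int :=
  objetos.foldl (fun score o => score + pvWeights.getD ((pvClassOf o).getD "") 0) 0

-- ===== PRECONDITION & SPEC =====
-- Pre_ excludes objects without a "class" key, on which the Python A raises KeyError (and B does too).
def Pre_caculateIntensity (objetos : List (List (String × String))) : Prop :=
  (objetos.all (fun o => (o.find? (fun kv => kv.1 == "class")).isSome)) = true
instance (objetos : List (List (String × String))) : Decidable (Pre_caculateIntensity objetos) := by unfold Pre_caculateIntensity; infer_instance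

def pvWitness_caculateIntensity : (List (List (String × String))) :=
  [[("class", "piscina")], [("class", "carro")], [("class", "arvore")]]

def Spec_caculateIntensity (objetos : List (List (String × String))) (out : Int) : Prop := out = caculateIntensity_alt objetos
instance (objetos : List (List (String × String))) (out : Int) : Decidable (Spec_caculateIntensity objetos out) := by unfold Spec_caculateIntensity; infer_instance

-- ===== CLAIM (what is proved, stated in full; the proofs are below) =====
def Claim_equal_caculateIntensity : Prop := ∀ (objetos : List (List (String × String))), Dom_caculateIntensity objetos → Pre_caculateIntensity objetos → Spec_caculateIntensity objetos (caculateIntensity objetos)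

-- ===== LEMMAS AND PROOFS =====

-- evaluating the weight table at an arbitrary key
lemma getD_weights (s : String) :
    pvWeights.getD s 0
      = if s = "piscina" then 9 else if s = "caixa_agua" then 4 else if s = "carro" then 1 else 0 := by
  have h : pvWeights = PySem.Dict.mk [("piscina", 9), ("caixa_agua", 4), ("carro", 1)] := by decide
  rw [h]
  simp only [PySem.Dict.getD, PySem.Dict.get?_mk_cons, beq_iff_eq]
  split_ifs <;> (try subst_vars) <;> simp [PySem.Dict.get?] <;> simp_all

-- B's loop as a sum of per-object weights
lemma alt_eq_sum (objetos : List (List (String × String))) :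
    caculateIntensity_alt objetos
      = (objetos.map (fun o => pvWeights.getD ((pvClassOf o).getD "") 0)).sum := by
  unfold caculateIntensity_alt
  rw [PySem.List.foldl_add]
  simp

-- A's weighted counts equal the sum of per-object weights (holds for every list, no precondition needed)
lemma a_eq_sum (objetos : List (List (String × String))) :
    caculateIntensity objetos
      = (objetos.map (fun o => pvWeights.getD ((pvClassOf o).getD "") 0)).sum := by
  induction objetos with
  | nil => decide
  | cons o t ih =>
    simp only [caculateIntensity, List.filter_cons, List.map_cons, List.sum_cons] at *
    simp at ih ⊢
    rw [getD_weights]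
    cases h : pvClassOf o with
    | none => simp; omega
    | some s =>
      by_cases h1 : s = "piscina"
      · subst h1; simp; rw [← ih]; ring
      · by_cases h2 : s = "caixa_agua"
        · subst h2; simp [h1]; rw [← ih]; ring
        · by_cases h3 : s = "carro"
          · subst h3; simp [h1, h2]; rw [← ih]; ring
          · simp [h1, h2, h3]; rw [← ih]

-- ===== VERDICT (by name: the statement is the Claim_ definition above) =====
theorem caculateIntensity_spec : Claim_equal_caculateIntensity := by
  intro objetos _ _
  unfold Spec_caculateIntensity
  rw [alt_eq_sum, a_eq_sum]
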